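-- pv_equiv track=rewrite | github.com/SebastianMoralesMartin/P2PChat | ClientLeo.py | encryptMsg
-- ===== SOURCE A (Python) =====
-- def encryptMsg(msg):
--     b = bytearray(msg, "utf-8")
--     criptedStr = ""
--     for byt in b:
--         t = int(byt)
--         key = int(bin(127), 2)
--         cripted = bin(t ^ key)
--         strCrypt = chr(int(cripted, 2))
--         criptedStr += strCrypt
--     return criptedStr
-- ===== SOURCE B (Python) =====
-- _TBL = bytes(i ^ 127 for i in range(256))
--
-- def encryptMsg(msg):
--     return msg.encode("utf-8").translate(_TBL).decode("latin-1")
-- ===== Notes on version B (the rewrite author's own statement) =====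
-- stated objective: idiomatic
-- what changed: Replaces the per-byte arithmetic loop with string concatenation by a precomputed 256-entry translation table applied in one bulk bytes.translate pass, decoded via latin-1.
import Mathlib
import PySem

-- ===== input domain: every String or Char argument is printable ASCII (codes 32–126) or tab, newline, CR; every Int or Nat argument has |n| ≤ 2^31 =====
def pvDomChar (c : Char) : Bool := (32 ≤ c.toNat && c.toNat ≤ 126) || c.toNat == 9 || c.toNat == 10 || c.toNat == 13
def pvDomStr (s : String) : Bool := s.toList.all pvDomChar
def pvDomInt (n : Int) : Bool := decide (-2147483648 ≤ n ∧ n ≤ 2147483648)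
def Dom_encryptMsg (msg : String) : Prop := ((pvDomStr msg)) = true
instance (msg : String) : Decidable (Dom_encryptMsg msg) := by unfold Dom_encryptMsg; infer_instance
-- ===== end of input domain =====

-- B replaces A's per-byte XOR loop with string concatenation by a precomputed
-- 256-entry translation table applied in one bulk translate pass (idiomatic).
-- On the ASCII domain Dom_, each UTF-8 byte equals the character's codepoint,
-- which is where both ports are exact.

-- ===== PORT A =====
-- for byt in b: criptedStr += chr(byt ^ 127)   (bin/int round-trips are identity)
def encryptMsg (msg : String) : String :=
  msg.toList.foldl (fun acc c => acc ++ String.ofList [Char.ofNat (c.toNat ^^^ 127)]) ""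

-- ===== PORT B =====
-- tbl = bytes(i ^ 127 for i in range(256)); encoded.translate(tbl).decode('latin-1')
def pvTbl : List Nat := (List.range 256).map (fun i => i ^^^ 127)

def encryptMsg_alt (msg : String) : String :=
  String.ofList (msg.toList.map (fun c => Char.ofNat (pvTbl.getD c.toNat 0)))

-- ===== PRECONDITION & SPEC =====
def Spec_encryptMsg (msg : String) (out : String) : Prop := out = encryptMsg_alt msg
instance (msg : String) (out : String) : Decidable (Spec_encryptMsg msg out) := by unfold Spec_encryptMsg; infer_instance

-- ===== CLAIM (what is proved, stated in full; the proofs are below) =====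
def Claim_equal_encryptMsg : Prop := ∀ (msg : String), Dom_encryptMsg msg → Spec_encryptMsg msg (encryptMsg msg)

-- ===== LEMMAS AND PROOFS =====
theorem pvTbl_getD (i : Nat) (h : i < 256) : pvTbl.getD i 0 = i ^^^ 127 := by
  simp [pvTbl, List.getD, h]

theorem encryptMsg_foldl (l : List Char) (acc : String) :
    l.foldl (fun acc c => acc ++ String.ofList [Char.ofNat (c.toNat ^^^ 127)]) acc
      = acc ++ String.ofList (l.map (fun c => Char.ofNat (c.toNat ^^^ 127))) := by
  induction l generalizing acc with
  | nil => simp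
  | cons c l ih =>
      simp only [List.foldl_cons, List.map_cons, ih]
      apply String.toList_injective
      simp

theorem encryptMsg_spec : Claim_equal_encryptMsg := by
  intro msg hdom
  unfold Spec_encryptMsg encryptMsg encryptMsg_alt
  rw [encryptMsg_foldl]
  have h0 : ("" : String) ++ String.ofList (msg.toList.map (fun c => Char.ofNat (c.toNat ^^^ 127)))
      = String.ofList (msg.toList.map (fun c => Char.ofNat (c.toNat ^^^ 127))) := by
    simp
  rw [h0]
  congr 1
  apply List.map_congr_left
  intro c hc
  have hall := (List.all_eq_true.mp hdom) c hc
  have hlt : c.toNat < 256 := by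
    simp only [pvDomChar, Bool.or_eq_true, Bool.and_eq_true, decide_eq_true_eq, beq_iff_eq] at hall
    omega
  rw [pvTbl_getD _ hlt]
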